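-- pv_equiv track=rewrite | github.com/sejongmin/Python_study | 백준/Silver/4659. 비밀번호 발음하기/비밀번호 발음하기.py | solution
-- ===== SOURCE A (Python) =====
-- def solution(s: str) -> bool:
--     vowel = {'a', 'e', 'i', 'o', 'u'}
--     before = s[0]
--     t_acc = 1 if before in vowel else 0
--     v_acc = 1 if before in vowel else 0
--     c_acc = 0 if before in vowel else 1
--     for i in range(1, len(s)):
--         if before == s[i]:
--             if before != 'e' and before != 'o':
--                 return False
--         if s[i] in vowel:
--             t_acc += 1
--             c_acc = 0
--             v_acc += 1
--             if v_acc == 3: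
--                 return False
--         elif s[i] not in vowel:
--             v_acc = 0
--             c_acc += 1
--             if c_acc == 3:
--                 return False
--         before = s[i]
--
--     return True if t_acc > 0 else False
-- ===== SOURCE B (Python) =====
-- def solution(s: str) -> bool:
--     vowels = {'a', 'e', 'i', 'o', 'u'}
--     if not any(ch in vowels for ch in s):
--         return False
--     for x, y in zip(s, s[1:]):
--         if x == y and x not in ('e', 'o'):
--             return False
--     for x, y, z in zip(s, s[1:], s[2:]):
--         if (x in vowels) == (y in vowels) == (z in vowels):
--             return False
--     return True
-- ===== Notes on version B (the rewrite author's own statement) =====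
-- stated objective: simpler
-- what changed: Replaced the single stateful pass (previous char plus three run counters with early returns) by three independent declarative checks: vowel membership, a zip scan over adjacent pairs, and a zip scan over adjacent triples.
-- outside the precondition, e.g. on solution(''): A raises IndexError, B returns False
import Mathlib
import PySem

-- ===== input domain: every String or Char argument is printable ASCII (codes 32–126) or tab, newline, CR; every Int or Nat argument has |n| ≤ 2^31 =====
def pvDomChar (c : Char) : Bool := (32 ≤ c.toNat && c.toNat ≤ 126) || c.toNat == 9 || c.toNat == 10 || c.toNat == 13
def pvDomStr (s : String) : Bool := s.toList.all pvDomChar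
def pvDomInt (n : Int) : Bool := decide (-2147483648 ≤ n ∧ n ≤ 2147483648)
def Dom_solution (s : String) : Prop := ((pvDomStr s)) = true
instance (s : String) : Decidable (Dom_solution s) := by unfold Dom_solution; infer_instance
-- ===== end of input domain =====

-- B replaces A's single stateful pass (previous char + three run counters, early returns)
-- by three independent checks: any-vowel, an adjacent-pair scan, an adjacent-triple scan (objective: simpler).

-- ===== PORT A =====
-- membership in the set {'a','e','i','o','u'}
def isVowel (c : Char) : Bool := c == 'a' || c == 'e' || c == 'i' || c == 'o' || c == 'u'

-- the for-loop of A: state (before, t_acc, v_acc, c_acc), early returns become `false` results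
def loopA (before : Char) (t v c : Int) : List Char → Bool
  | [] => decide (t > 0)          -- `return True if t_acc > 0 else False`
  | x :: rest =>
    if before == x && !(before == 'e') && !(before == 'o') then false
    else if isVowel x then
      if v + 1 == 3 then false
      else loopA x (t + 1) (v + 1) 0 rest
    else
      if c + 1 == 3 then false
      else loopA x t 0 (c + 1) rest

def solution (s : String) : Bool :=
  match s.toList with
  | [] => false                   -- Python raises IndexError at s[0]; excluded by Pre_solution
  | h :: rest =>
    loopA h (if isVowel h then 1 else 0) (if isVowel h then 1 else 0)
      (if isVowel h then 0 else 1) rest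

-- ===== PORT B =====
-- `if x == y and x not in ('e','o')` for an adjacent pair
def badPair (p : Char × Char) : Bool := p.1 == p.2 && !(p.1 == 'e' || p.1 == 'o')
-- `(x in vowels) == (y in vowels) == (z in vowels)` for an adjacent triple
def badTriple (q : (Char × Char) × Char) : Bool :=
  (isVowel q.1.1 == isVowel q.1.2) && (isVowel q.1.2 == isVowel q.2)

def solution_alt (s : String) : Bool :=
  let l := s.toList
  if !(l.any isVowel) then false
  else if (l.zip l.tail).any badPair then false          -- for x, y in zip(s, s[1:])
  else if ((l.zip l.tail).zip l.tail.tail).any badTriple then false  -- zip(s, s[1:], s[2:])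
  else true

-- ===== PRECONDITION & SPEC =====
-- A evaluates s[0] first, so it raises IndexError on the empty string: Pre_ excludes exactly "".
def Pre_solution (s : String) : Prop := s.toList ≠ []
instance (s : String) : Decidable (Pre_solution s) := by unfold Pre_solution; infer_instance
def pvWitness_solution : String := "aab"

def Spec_solution (s : String) (out : Bool) : Prop := out = solution_alt s
instance (s : String) (out : Bool) : Decidable (Spec_solution s out) := by unfold Spec_solution; infer_instance

-- ===== CLAIM (what is proved, stated in full; the proofs are below) =====
def Claim_equal_solution : Prop := ∀ (s : String), Dom_solution s → Pre_solution s → Spec_solution s (solution s)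

-- ===== LEMMAS AND PROOFS =====

-- the pair scan of B, on a plain list
def pairBad (l : List Char) : Bool := (l.zip l.tail).any badPair
-- the triple scan of B, on a plain list
def tripBad (l : List Char) : Bool := ((l.zip l.tail).zip l.tail.tail).any badTriple

-- invariant tying A's run counters (v, c) to a one-element "pad" replaying the current run
def RunInv (before : Char) (v c : Int) (pad : List Char) : Prop :=
  (isVowel before = true ∧ c = 0 ∧
     ((v = 1 ∧ pad = []) ∨ (v = 2 ∧ ∃ p, pad = [p] ∧ isVowel p = true)))
  ∨ (isVowel before = false ∧ v = 0 ∧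
     ((c = 1 ∧ pad = []) ∨ (c = 2 ∧ ∃ p, pad = [p] ∧ isVowel p = false)))

lemma pairBad_cons₂ (a b : Char) (l : List Char) :
    pairBad (a :: b :: l) = (badPair (a, b) || pairBad (b :: l)) := by
  simp [pairBad]

lemma tripBad_cons₃ (a b c : Char) (l : List Char) :
    tripBad (a :: b :: c :: l) = (badTriple ((a, b), c) || tripBad (b :: c :: l)) := by
  simp [tripBad]

lemma tripBad_cons_of_diff (a b : Char) (l : List Char)
    (hab : (isVowel a == isVowel b) = false) :
    tripBad (a :: b :: l) = tripBad (b :: l) := by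
  cases l with
  | nil => simp [tripBad]
  | cons c l' => simp [tripBad_cons₃, badTriple, hab]

lemma loopA_eq (rest : List Char) : ∀ (before : Char) (t v c : Int) (pad : List Char),
    0 ≤ t → RunInv before v c pad →
    loopA before t v c rest =
      ((decide (0 < t) || rest.any isVowel) && !pairBad (before :: rest)
        && !tripBad (pad ++ before :: rest)) := by
  induction rest with
  | nil =>
    intro before t v c pad ht hinv
    have hpad : pad = [] ∨ ∃ p, pad = [p] := by
      rcases hinv with ⟨_, _, h | ⟨_, p, hp, _⟩⟩ | ⟨_, _, h | ⟨_, p, hp, _⟩⟩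
      · exact Or.inl h.2
      · exact Or.inr ⟨p, hp⟩
      · exact Or.inl h.2
      · exact Or.inr ⟨p, hp⟩
    rcases hpad with h | ⟨p, h⟩ <;>
      simp [loopA, h, pairBad, tripBad]
  | cons x rest ih =>
    intro before t v c pad ht hinv
    by_cases hpair : (before == x && !(before == 'e') && !(before == 'o')) = true
    · -- A returns False; B's pair scan finds (before, x)
      have hb : badPair (before, x) = true := by
        simp only [badPair]
        simp only [Bool.and_eq_true, Bool.not_eq_true'] at hpair ⊢
        simp [hpair.1.1, hpair.1.2, hpair.2]
      simp [loopA, hpair, pairBad_cons₂, hb]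
    · rw [loopA]
      rw [if_neg hpair]
      have hbp : badPair (before, x) = false := by
        revert hpair
        simp only [badPair]
        cases h1 : (before == x) <;> cases h2 : (before == 'e') <;>
          cases h3 : (before == 'o') <;> simp
      by_cases hx : isVowel x = true
      · rw [if_pos hx]
        rcases hinv with ⟨hv, hc0, hrun⟩ | ⟨hv, hv0, hrun⟩
        · -- before is a vowel
          rcases hrun with ⟨h1, hp⟩ | ⟨h2, p, hp, hpv⟩
          · -- v = 1: recurse with v = 2, pad' = [before]
            rw [show (v + 1 == 3) = false by simp [h1], if_neg (by simp)]
            rw [ih x (t + 1) (v + 1) 0 [before] (by omega)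
                (Or.inl ⟨hx, rfl, Or.inr ⟨by omega, before, rfl, hv⟩⟩)]
            have ht1 : decide (0 < t + 1) = true := by simp; omega
            simp only [hp, List.nil_append, List.any_cons, hx, ht1,
              pairBad_cons₂, hbp, List.cons_append]
            cases tripBad (before :: x :: rest) <;> cases pairBad (x :: rest) <;> simp
          · -- v = 2: A returns False; B finds the triple (p, before, x)
            rw [if_pos (by simp [h2])]
            have hbt : badTriple ((p, before), x) = true := by simp [badTriple, hpv, hv, hx]
            simp [hp, tripBad_cons₃, hbt]
        · -- before is a consonant, x a vowel: class changes, run resets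
          rw [show (v + 1 == 3) = false by simp [hv0], if_neg (by simp)]
          rw [ih x (t + 1) (v + 1) 0 [] (by omega)
              (Or.inl ⟨hx, rfl, Or.inl ⟨by omega, rfl⟩⟩)]
          have ht1 : decide (0 < t + 1) = true := by simp; omega
          have hd : (isVowel before == isVowel x) = false := by simp [hv, hx]
          have hnt : tripBad (pad ++ before :: x :: rest) = tripBad (x :: rest) := by
            rcases hrun with ⟨_, hp⟩ | ⟨_, p, hp, hpv⟩
            · rw [hp]; simpa using tripBad_cons_of_diff before x rest hd
            · rw [hp, List.cons_append, List.nil_append, tripBad_cons₃,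
                tripBad_cons_of_diff before x rest hd]
              simp [badTriple, hd]
          rw [hnt]
          simp only [List.any_cons, hx, ht1, pairBad_cons₂, hbp, List.nil_append]
          cases tripBad (x :: rest) <;> cases pairBad (x :: rest) <;> simp
      · rw [if_neg hx]
        have hxf : isVowel x = false := by simpa using hx
        rcases hinv with ⟨hv, hc0, hrun⟩ | ⟨hv, hv0, hrun⟩
        · -- before a vowel, x a consonant: class changes, run resets
          rw [show (c + 1 == 3) = false by simp [hc0], if_neg (by simp)]
          rw [ih x t 0 (c + 1) [] ht
              (Or.inr ⟨hxf, rfl, Or.inl ⟨by omega, rfl⟩⟩)]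
          have hd : (isVowel before == isVowel x) = false := by simp [hv, hxf]
          have hnt : tripBad (pad ++ before :: x :: rest) = tripBad (x :: rest) := by
            rcases hrun with ⟨_, hp⟩ | ⟨_, p, hp, hpv⟩
            · rw [hp]; simpa using tripBad_cons_of_diff before x rest hd
            · rw [hp, List.cons_append, List.nil_append, tripBad_cons₃,
                tripBad_cons_of_diff before x rest hd]
              simp [badTriple, hd]
          rw [hnt]
          simp only [List.any_cons, hxf, pairBad_cons₂, hbp, List.nil_append]
          cases tripBad (x :: rest) <;> cases pairBad (x :: rest) <;>
            cases decide (0 < t) <;> cases rest.any isVowel <;> simp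
        · -- before and x both consonants
          rcases hrun with ⟨h1, hp⟩ | ⟨h2, p, hp, hpv⟩
          · -- c = 1: recurse with c = 2, pad' = [before]
            rw [show (c + 1 == 3) = false by simp [h1], if_neg (by simp)]
            rw [ih x t 0 (c + 1) [before] ht
                (Or.inr ⟨hxf, rfl, Or.inr ⟨by omega, before, rfl, hv⟩⟩)]
            simp only [hp, List.nil_append, List.any_cons, hxf,
              pairBad_cons₂, hbp, List.cons_append]
            cases tripBad (before :: x :: rest) <;> cases pairBad (x :: rest) <;>
              cases decide (0 < t) <;> cases rest.any isVowel <;> simp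
          · -- c = 2: A returns False; B finds the triple (p, before, x)
            rw [if_pos (by simp [h2])]
            have hbt : badTriple ((p, before), x) = true := by
              simp [badTriple, hpv, hv, hxf]
            simp [hp, tripBad_cons₃, hbt]

-- ===== VERDICT (by name: the statement is the Claim_ definition above) =====
theorem solution_spec : Claim_equal_solution := by
  intro s _ hpre
  unfold Spec_solution
  cases hl : s.toList with
  | nil => exact absurd hl hpre
  | cons h rest =>
    have hInv : RunInv h (if isVowel h then 1 else 0)
        (if isVowel h then 0 else 1) [] := by
      cases hv : isVowel h <;> simp [RunInv, hv]
    have hkey := loopA_eq rest h (if isVowel h then 1 else 0) (if isVowel h then 1 else 0)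
        (if isVowel h then 0 else 1) [] (by split <;> omega) hInv
    have ht0 : decide (0 < if isVowel h then (1:Int) else 0) = isVowel h := by
      cases isVowel h <;> simp
    simp only [solution, solution_alt, hl, hkey, List.nil_append, ht0, List.any_cons]
    simp only [pairBad, tripBad]
    cases hany : (isVowel h || rest.any isVowel) <;>
      cases hpb : (((h :: rest).zip (h :: rest).tail).any badPair) <;>
      cases htb : ((((h :: rest).zip (h :: rest).tail).zip (h :: rest).tail.tail).any badTriple) <;>
      simp_all
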